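-- pv_equiv track=rewrite | github.com/Nghia03092004/nghia03092004.github.io | project_euler_unified/problem_897/solution.py | count_palindromes_formula
-- ===== SOURCE A (Python) =====
-- def to_base(n, b):
--     """Convert n to base b, return list of digits (most significant first)."""
--     if n == 0:
--         return [0]
--     digits = []
--     while n > 0:
--         digits.append(n % b)
--         n //= b
--     return digits[::-1]
--
-- def count_k_digit_palindromes(k, b):
--     """Count k-digit palindromes in base b using the formula."""
--     if k <= 0:
--         return 0
--     return (b - 1) * (b ** ((k - 1) // 2))
--
-- def count_palindromes_formula(N, b):
--     """Count palindromes <= N using digit-by-digit analysis."""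
--     if N <= 0:
--         return 0
--     digits = to_base(N, b)
--     K = len(digits)
--     # Count all palindromes with fewer than K digits
--     total = sum(count_k_digit_palindromes(k, b) for k in range(1, K))
--     # Count K-digit palindromes <= N by generating them
--     half_len = (K + 1) // 2
--     # Iterate over first half
--     start = b ** (half_len - 1)
--     end = b ** half_len
--     for h in range(start, end):
--         h_digits = to_base(h, b)
--         if K % 2 == 0:
--             pal_digits = h_digits + h_digits[::-1]
--         else:
--             pal_digits = h_digits + h_digits[-2::-1]
--         # Convert palindrome back to number
--         val = 0
--         for d in pal_digits:
--             val = val * b + d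
--         if val <= N:
--             total += 1
--         elif h_digits[0] > digits[0]:
--             break
--     return total
-- ===== SOURCE B (Python) =====
-- def _to_base(n, b):
--     """Digits of n in base b, most significant first."""
--     if n == 0:
--         return [0]
--     digits = []
--     while n > 0:
--         digits.append(n % b)
--         n //= b
--     return digits[::-1]
--
-- def _palindrome_from_half(h, K, b):
--     """The K-digit base-b palindrome whose leading half is h."""
--     hd = _to_base(h, b)
--     second = hd[::-1] if K % 2 == 0 else hd[-2::-1]
--     v = 0
--     for d in hd + second:
--         v = v * b + d
--     return v
--
-- def count_palindromes_formula(N, b):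
--     """Count palindromes <= N: closed form, no scan over candidate halves."""
--     if N <= 0:
--         return 0
--     # K = number of base-b digits of N
--     K = 0
--     n = N
--     while n > 0:
--         n //= b
--         K += 1
--     # closed-form count of all palindromes with fewer than K digits
--     m = (K - 1) // 2
--     total = 2 * (b ** m - 1) if K % 2 == 1 else (b + 1) * b ** m - 2
--     # K-digit palindromes <= N: their half is at most h0 = leading half of N,
--     # and exactly one candidate (half h0 itself) needs an explicit comparison
--     half_len = (K + 1) // 2
--     h0 = N // b ** (K - half_len)
--     total += h0 - b ** (half_len - 1)
--     if _palindrome_from_half(h0, K, b) <= N: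
--         total += 1
--     return total
-- ===== Notes on version B (the rewrite author's own statement) =====
-- stated objective: faster
-- what changed: A enumerates every candidate first half h in [b^(half-1), b^half) (about sqrt(N) of them) and rebuilds each palindrome; B replaces the whole scan by a closed form: the leading half h0 = N // b^(K-half) of N bounds the admissible halves, so the K-digit count is h0 - b^(half-1) plus one explicit comparison, and the shorter-palindrome sum is collapsed to a closed formula; …
-- outside the precondition, e.g. on count_palindromes_formula(5, -2): A returns 0, B returns 5
import Mathlib
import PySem

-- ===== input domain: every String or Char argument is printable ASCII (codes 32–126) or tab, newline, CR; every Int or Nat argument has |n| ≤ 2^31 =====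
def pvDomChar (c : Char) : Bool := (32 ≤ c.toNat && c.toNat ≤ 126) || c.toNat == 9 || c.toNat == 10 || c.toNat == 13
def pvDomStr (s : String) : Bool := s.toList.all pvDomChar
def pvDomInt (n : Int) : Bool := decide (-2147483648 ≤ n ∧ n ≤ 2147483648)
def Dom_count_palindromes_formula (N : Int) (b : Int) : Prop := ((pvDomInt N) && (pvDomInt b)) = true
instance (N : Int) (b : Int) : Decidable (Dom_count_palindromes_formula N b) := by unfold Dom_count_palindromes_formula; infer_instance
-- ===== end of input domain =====

-- B replaces A's scan over the candidate first halves by a closed form built from the leading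
-- half of N (objective: faster; measured up to ~456x where A's scan runs, but A's break makes
-- some inputs equally fast, so the probe could not confirm a uniform ratio).


-- ===== PORT A =====
-- shared helper: Python to_base's while loop (both Source A and Source B contain this helper verbatim).
-- Fuel n.toNat+1 bounds the iteration count: under Pre_ (2 ≤ b) n strictly decreases, so it never runs out.
def toBaseLoop (b : Int) : Nat → Int → List Int → List Int
  | 0, _, digits => digits
  | fuel + 1, n, digits =>
    if 0 < n then toBaseLoop b fuel (PySem.Int.floordiv n b) (digits ++ [PySem.Int.mod n b])
    else digits

-- to_base(n, b): digits of n in base b, most significant first (digits[::-1] = List.reverse)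
def to_base (n : Int) (b : Int) : List Int :=
  if n = 0 then [0] else (toBaseLoop b (n.toNat + 1) n []).reverse

def count_k_digit_palindromes (k : Int) (b : Int) : Int :=
  if k ≤ 0 then 0 else (b - 1) * b ^ (PySem.Int.floordiv (k - 1) 2).toNat

-- A's `for h in range(start, end)` loop with its break, as a lazy counting loop exactly like
-- Python's range iteration (h_digits[-2::-1] ported by hand as dropLast.reverse: reverse of all
-- but the last element, exact for every list incl. length ≤ 1)
def palLoopA (N b K d0 end_ h total : Int) : Int :=
  if hlt : h < end_ then
    let h_digits := to_base h b
    let pal_digits := if PySem.Int.mod K 2 = 0 then h_digits ++ h_digits.reverse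
                      else h_digits ++ h_digits.dropLast.reverse
    let val := pal_digits.foldl (fun v d => v * b + d) 0
    if val ≤ N then palLoopA N b K d0 end_ (h + 1) (total + 1)
    else if d0 < PySem.List.pyGetD h_digits 0 0 then total  -- break (h_digits[0] in range under Pre_)
    else palLoopA N b K d0 end_ (h + 1) total
  else total
termination_by (end_ - h).toNat
decreasing_by all_goals (simp_wf; omega)

def count_palindromes_formula (N : Int) (b : Int) : Int :=
  if N ≤ 0 then 0 else
  let digits := to_base N b
  let K : Int := (digits.length : Int)
  let total := (PySem.List.pyRange 1 K 1).foldl (fun acc k => acc + count_k_digit_palindromes k b) 0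
  let half_len := PySem.Int.floordiv (K + 1) 2
  let start := b ^ (half_len - 1).toNat
  let end_ := b ^ half_len.toNat
  palLoopA N b K (PySem.List.pyGetD digits 0 0) end_ start total

-- ===== PORT B =====
-- _palindrome_from_half(h, K, b)  (hd[::-1] = reverse, hd[-2::-1] = dropLast.reverse, as above)
def palindrome_from_half (h K b : Int) : Int :=
  let hd := to_base h b
  let second := if PySem.Int.mod K 2 = 0 then hd.reverse else hd.dropLast.reverse
  (hd ++ second).foldl (fun v d => v * b + d) 0

-- B's digit-count while loop (fuel as in toBaseLoop)
def kLoop (b : Int) : Nat → Int → Int → Int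
  | 0, _, K => K
  | fuel + 1, n, K => if 0 < n then kLoop b fuel (PySem.Int.floordiv n b) (K + 1) else K

def count_palindromes_formula_alt (N : Int) (b : Int) : Int :=
  if N ≤ 0 then 0 else
  let K := kLoop b (N.toNat + 1) N 0
  let m := PySem.Int.floordiv (K - 1) 2
  let total := if PySem.Int.mod K 2 = 1 then 2 * (b ^ m.toNat - 1) else (b + 1) * b ^ m.toNat - 2
  let half_len := PySem.Int.floordiv (K + 1) 2
  let h0 := PySem.Int.floordiv N (b ^ (K - half_len).toNat)
  let total := total + (h0 - b ^ (half_len - 1).toNat)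
  if palindrome_from_half h0 K b ≤ N then total + 1 else total

-- ===== PRECONDITION & SPEC =====
-- Pre_ excludes N > 0 with b ≤ 1: b = 0 raises ZeroDivisionError, b = 1 diverges in to_base,
-- and b < 0 is outside the natural domain of a positional base (A returns accidental values there).
def Pre_count_palindromes_formula (N : Int) (b : Int) : Prop := N ≤ 0 ∨ 2 ≤ b
instance (N : Int) (b : Int) : Decidable (Pre_count_palindromes_formula N b) := by
  unfold Pre_count_palindromes_formula; infer_instance

def pvWitness_count_palindromes_formula : Int × Int := (6, 2)

def Spec_count_palindromes_formula (N : Int) (b : Int) (out : Int) : Prop := out = count_palindromes_formula_alt N b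
instance (N : Int) (b : Int) (out : Int) : Decidable (Spec_count_palindromes_formula N b out) := by unfold Spec_count_palindromes_formula; infer_instance

-- ===== CLAIM (what is proved, stated in full; the proofs are below) =====
def Claim_equal_count_palindromes_formula : Prop := ∀ (N : Int) (b : Int), Dom_count_palindromes_formula N b → Pre_count_palindromes_formula N b → Spec_count_palindromes_formula N b (count_palindromes_formula N b)

-- ===== LEMMAS AND PROOFS =====

-- toBaseLoop terminates within fuel ≥ n.toNat, producing the little-endian base-b digits of n
theorem toBaseLoop_eq (b : Int) (hb : 2 ≤ b) :
    ∀ (fuel : Nat) (n : Int) (acc : List Int), n.toNat ≤ fuel →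
      toBaseLoop b fuel n acc = acc ++ (Nat.digits b.toNat n.toNat).map Int.ofNat := by
  intro fuel
  induction fuel with
  | zero =>
    intro n acc hf
    have : n.toNat = 0 := by omega
    simp [toBaseLoop, this]
  | succ f ih =>
    intro n acc hf
    by_cases hn : 0 < n
    · have hβ : 2 ≤ b.toNat := by omega
      have hbe : (b.toNat : Int) = b := Int.toNat_of_nonneg (by omega)
      have hne : (n.toNat : Int) = n := Int.toNat_of_nonneg (by omega)
      have hν : 0 < n.toNat := by omega
      have hfd : PySem.Int.floordiv n b = ((n.toNat / b.toNat : Nat) : Int) := by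
        rw [← hbe, ← hne]; exact PySem.Int.floordiv_natCast _ _
      have hmd : PySem.Int.mod n b = ((n.toNat % b.toNat : Nat) : Int) := by
        rw [← hbe, ← hne]; exact PySem.Int.mod_natCast _ _
      have hlt : n.toNat / b.toNat < n.toNat := Nat.div_lt_self hν (by omega)
      have hrec := ih ((n.toNat / b.toNat : Nat) : Int) (acc ++ [((n.toNat % b.toNat : Nat) : Int)])
        (by rw [Int.toNat_natCast]; omega)
      rw [toBaseLoop, if_pos hn, hfd, hmd, hrec, Int.toNat_natCast]
      rw [Nat.digits_def' (by omega : 1 < b.toNat) hν]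
      simp
    · have : n.toNat = 0 := by omega
      simp [toBaseLoop, if_neg hn, this]

theorem to_base_eq (b : Int) (hb : 2 ≤ b) (n : Int) (hn : 0 < n) :
    to_base n b = ((Nat.digits b.toNat n.toNat).map Int.ofNat).reverse := by
  rw [to_base, if_neg (by omega), toBaseLoop_eq b hb _ _ _ (by omega)]
  simp

theorem kLoop_eq (b : Int) (hb : 2 ≤ b) :
    ∀ (fuel : Nat) (n : Int) (K : Int), n.toNat ≤ fuel →
      kLoop b fuel n K = K + ((Nat.digits b.toNat n.toNat).length : Int) := by
  intro fuel
  induction fuel with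
  | zero =>
    intro n K hf
    have : n.toNat = 0 := by omega
    simp [kLoop, this]
  | succ f ih =>
    intro n K hf
    by_cases hn : 0 < n
    · have hbe : (b.toNat : Int) = b := Int.toNat_of_nonneg (by omega)
      have hne : (n.toNat : Int) = n := Int.toNat_of_nonneg (by omega)
      have hν : 0 < n.toNat := by omega
      have hfd : PySem.Int.floordiv n b = ((n.toNat / b.toNat : Nat) : Int) := by
        rw [← hbe, ← hne]; exact PySem.Int.floordiv_natCast _ _
      have hlt : n.toNat / b.toNat < n.toNat := Nat.div_lt_self hν (by omega)
      have hrec := ih ((n.toNat / b.toNat : Nat) : Int) (K + 1) (by rw [Int.toNat_natCast]; omega)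
      rw [kLoop, if_pos hn, hfd, hrec, Int.toNat_natCast]
      rw [Nat.digits_def' (by omega : 1 < b.toNat) hν]
      simp only [List.length_cons]
      push_cast
      ring
    · have : n.toNat = 0 := by omega
      simp [kLoop, if_neg hn, this]

-- Horner fold: prepending to the accumulator
theorem foldl_horner_shift (b : Int) :
    ∀ (l : List Int) (v : Int),
      l.foldl (fun v d => v * b + d) v = v * b ^ l.length + l.foldl (fun v d => v * b + d) 0 := by
  intro l
  induction l with
  | nil => intro v; simp
  | cons d t ih =>
    intro v
    simp only [List.foldl_cons, List.length_cons]
    rw [ih (v * b + d), ih (0 * b + d)]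
    ring

-- Horner fold over the big-endian digit list reconstructs the number
theorem foldl_horner_digits (b : Int) (hb : 2 ≤ b) (x : Nat) :
    (((Nat.digits b.toNat x).map Int.ofNat).reverse).foldl (fun v d => v * b + d) 0 = (x : Int) := by
  conv_rhs => rw [← Nat.ofDigits_digits b.toNat x]
  generalize (Nat.digits b.toNat x) = ds
  induction ds with
  | nil => rw [Nat.ofDigits_nil]; rfl
  | cons d t ih =>
    rw [List.map_cons, List.reverse_cons, List.foldl_append, ih, Nat.ofDigits_cons]
    have hbe : (b.toNat : Int) = b := Int.toNat_of_nonneg (by omega)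
    simp only [List.foldl_cons, List.foldl_nil]
    push_cast [hbe, Int.ofNat_eq_natCast]
    ring

-- Horner fold of a digit list is within [0, b^len)
theorem foldl_horner_bound (b : Int) (hb : 2 ≤ b) :
    ∀ (l : List Int), (∀ d ∈ l, 0 ≤ d ∧ d < b) →
      0 ≤ l.foldl (fun v d => v * b + d) 0 ∧ l.foldl (fun v d => v * b + d) 0 < b ^ l.length := by
  intro l
  induction l with
  | nil => intro _; simp
  | cons d t ih =>
    intro hd
    obtain ⟨hd0, hdb⟩ := hd d (by simp)
    have ht := ih (fun x hx => hd x (by simp [hx]))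
    simp only [List.foldl_cons, List.length_cons]
    rw [foldl_horner_shift]
    have hpow : (0:Int) < b ^ t.length := by positivity
    constructor
    · nlinarith [ht.1]
    · have hstep : (0*b+d) * b ^ t.length + t.foldl (fun v d => v * b + d) 0 < (d+1) * b ^ t.length := by
        nlinarith [ht.2]
      calc (0*b+d) * b ^ t.length + t.foldl (fun v d => v * b + d) 0
          < (d+1) * b ^ t.length := hstep
        _ ≤ b * b ^ t.length := by nlinarith
        _ = b ^ (t.length + 1) := by ring

-- A's inline palindrome value is B's palindrome_from_half
theorem A_val_eq (h K b : Int) :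
    (if PySem.Int.mod K 2 = 0 then to_base h b ++ (to_base h b).reverse
     else to_base h b ++ (to_base h b).dropLast.reverse).foldl (fun v d => v * b + d) 0
    = palindrome_from_half h K b := by
  unfold palindrome_from_half
  by_cases hc : PySem.Int.mod K 2 = 0
  · simp only [if_pos hc, List.foldl_append]
  · simp only [if_neg hc, List.foldl_append]

-- for an h with exactly `half` digits, the L-digit palindrome built on h is
-- h·b^(L-half) + s with 0 ≤ s < b^(L-half)
theorem pal_decomp (b : Int) (hb : 2 ≤ b) (L half : Nat) (hL : 1 ≤ L) (hhalf : half = (L + 1) / 2)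
    (h : Int) (hlo : b ^ (half - 1) ≤ h) (hhi : h < b ^ half) :
    ∃ s : Int, palindrome_from_half h (L : Int) b = h * b ^ (L - half) + s ∧ 0 ≤ s ∧ s < b ^ (L - half) := by
  have hbe : (b.toNat : Int) = b := Int.toNat_of_nonneg (by omega)
  have hβ : 1 < b.toNat := by omega
  have hpos : 0 < h := lt_of_lt_of_le (by positivity) hlo
  have hηe : (h.toNat : Int) = h := Int.toNat_of_nonneg (by omega)
  have e1 : ((b.toNat ^ half : Nat) : Int) = b ^ half := by push_cast [hbe]; ring
  have e2 : ((b.toNat ^ (half - 1) : Nat) : Int) = b ^ (half - 1) := by push_cast [hbe]; ring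
  have hlt : h.toNat < b.toNat ^ half := by omega
  have hge : b.toNat ^ (half - 1) ≤ h.toNat := by omega
  have hh1 : 1 ≤ half := by omega
  have hlen : (Nat.digits b.toNat h.toNat).length = half := by
    have hub : (Nat.digits b.toNat h.toNat).length ≤ half := (Nat.digits_length_le_iff hβ _).mpr hlt
    have hlb : ¬ ((Nat.digits b.toNat h.toNat).length ≤ half - 1) := by
      intro hc
      have := (Nat.digits_length_le_iff hβ h.toNat).mp hc
      omega
    omega
  have hdlen : ((Nat.digits b.toNat h.toNat).map Int.ofNat).reverse.length = half := by
    simp [hlen]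
  have hdval : (((Nat.digits b.toNat h.toNat).map Int.ofNat).reverse).foldl (fun v d => v * b + d) 0 = h := by
    rw [foldl_horner_digits b hb, hηe]
  have hdmem : ∀ d ∈ ((Nat.digits b.toNat h.toNat).map Int.ofNat).reverse, 0 ≤ d ∧ d < b := by
    intro d hd
    rw [List.mem_reverse, List.mem_map] at hd
    obtain ⟨d0, hd0, rfl⟩ := hd
    have := Nat.digits_lt_base hβ hd0
    constructor
    · exact Int.natCast_nonneg d0
    · rw [Int.ofNat_eq_natCast]; omega
  have hmodL : PySem.Int.mod (L : Int) 2 = ((L % 2 : Nat) : Int) := by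
    exact_mod_cast PySem.Int.mod_natCast L 2
  unfold palindrome_from_half
  rw [to_base_eq b hb h hpos]
  set hd : List Int := ((Nat.digits b.toNat h.toNat).map Int.ofNat).reverse with hhd
  by_cases hpar : L % 2 = 0
  · have hcond : PySem.Int.mod (L : Int) 2 = 0 := by rw [hmodL, hpar]; rfl
    simp only [if_pos hcond]
    have hTl : hd.reverse.length = half := by simp [hdlen]
    have hbound := foldl_horner_bound b hb hd.reverse (by intro d hdm; exact hdmem d (by simpa using hdm))
    refine ⟨hd.reverse.foldl (fun v d => v * b + d) 0, ?_, ?_, ?_⟩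
    · rw [List.foldl_append, hdval, foldl_horner_shift b hd.reverse h, hTl]
      have hte : L - half = half := by omega
      rw [hte]
    · exact hbound.1
    · rw [hTl] at hbound
      have hte : L - half = half := by omega
      rw [hte]; exact hbound.2
  · have hcond : ¬ (PySem.Int.mod (L : Int) 2 = 0) := by
      rw [hmodL]; intro hc
      have : L % 2 = 0 := by exact_mod_cast hc
      omega
    simp only [if_neg hcond]
    have hTl : hd.dropLast.reverse.length = half - 1 := by simp [hdlen]
    have hbound := foldl_horner_bound b hb hd.dropLast.reverse (by
      intro d hdm
      apply hdmem
      rw [List.mem_reverse] at hdm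
      exact List.dropLast_subset _ hdm)
    refine ⟨hd.dropLast.reverse.foldl (fun v d => v * b + d) 0, ?_, ?_, ?_⟩
    · rw [List.foldl_append, hdval, foldl_horner_shift b hd.dropLast.reverse h, hTl]
      have hte : L - half = half - 1 := by omega
      rw [hte]
    · exact hbound.1
    · rw [hTl] at hbound
      have hte : L - half = half - 1 := by omega
      rw [hte]; exact hbound.2

-- A's loop with break counts the halves below h0, plus the explicit comparison at h0
theorem loopA_count (N b K d0 end_ h0 start : Int)
    (h0hi : h0 < end_)
    (Hle : ∀ h : Int, start ≤ h → h < end_ → h < h0 → palindrome_from_half h K b ≤ N)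
    (Hgt : ∀ h : Int, start ≤ h → h < end_ → h0 < h → N < palindrome_from_half h K b) :
    ∀ (h total : Int), start ≤ h →
      palLoopA N b K d0 end_ h total
        = total + (if h ≤ h0 then (h0 - h) + (if palindrome_from_half h0 K b ≤ N then 1 else 0) else 0) := by
  have main : ∀ (k : Nat) (h total : Int), start ≤ h → (end_ - h).toNat = k →
      palLoopA N b K d0 end_ h total
        = total + (if h ≤ h0 then (h0 - h) + (if palindrome_from_half h0 K b ≤ N then 1 else 0) else 0) := by
    intro k
    induction k with
    | zero =>
      intro h total hsh hk
      rw [palLoopA, dif_neg (by omega)]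
      rw [if_neg (by omega)]
      ring
    | succ k ih =>
      intro h total hsh hk
      have hlt : h < end_ := by omega
      rw [palLoopA, dif_pos hlt]
      simp only [A_val_eq]
      by_cases hv : palindrome_from_half h K b ≤ N
      · have hle0 : h ≤ h0 := by
          by_contra hc
          exact absurd hv (not_le.mpr (Hgt h hsh hlt (by omega)))
        rw [if_pos hv, ih (h + 1) (total + 1) (by omega) (by omega)]
        by_cases heq : h = h0
        · subst heq
          split_ifs <;> omega
        · split_ifs <;> omega
      · have hge0 : h0 ≤ h := by
          by_contra hc
          exact absurd (Hle h hsh hlt (by omega)) hv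
        have hRHS : (if h ≤ h0 then (h0 - h) + (if palindrome_from_half h0 K b ≤ N then 1 else 0) else 0) = 0 := by
          by_cases heq : h = h0
          · subst heq
            rw [if_pos (le_refl _), if_neg hv]
            ring
          · rw [if_neg (by omega)]
        rw [if_neg hv, hRHS]
        split_ifs with hbrk
        · omega
        · rw [ih (h + 1) total (by omega) (by omega), if_neg (by omega)]
  intro h total hsh
  exact main _ h total hsh rfl

-- A's prefix sum over range(1, L) equals B's closed form
theorem prefix_sum_eq (b : Int) :
    ∀ (L : Nat), 1 ≤ L →
    (PySem.List.pyRange 1 (L : Int) 1).foldl (fun acc k => acc + count_k_digit_palindromes k b) 0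
      = (if L % 2 = 1 then 2 * (b ^ ((L - 1) / 2) - 1) else (b + 1) * b ^ ((L - 1) / 2) - 2) := by
  intro L
  induction L with
  | zero => omega
  | succ L ih =>
    intro _
    by_cases hL1 : L = 0
    · subst hL1
      rw [show ((1 : Nat) : Int) = 1 by norm_num]
      rw [PySem.List.pyRange_one_eq_nil (le_refl 1)]
      norm_num
    · have hL : 1 ≤ L := by omega
      have hcast : ((L + 1 : Nat) : Int) = (L : Int) + 1 := by push_cast; ring
      rw [hcast, PySem.List.pyRange_one_succ_right (by exact_mod_cast hL), List.foldl_append, ih hL]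
      have hck : count_k_digit_palindromes (L : Int) b = (b - 1) * b ^ ((L - 1) / 2) := by
        rw [count_k_digit_palindromes, if_neg (by exact_mod_cast not_le.mpr (by omega : (0:Int) < (L:Int)))]
        have h1 : ((L : Int) - 1) = ((L - 1 : Nat) : Int) := by omega
        rw [h1, show (2:Int) = ((2:Nat):Int) by norm_num, PySem.Int.floordiv_natCast, Int.toNat_natCast]
      simp only [List.foldl_cons, List.foldl_nil, hck]
      by_cases hpar : L % 2 = 1
      · rw [if_pos hpar, if_neg (by omega)]
        have h2 : (L + 1 - 1) / 2 = (L - 1) / 2 := by omega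
        rw [h2]; ring
      · rw [if_neg hpar, if_pos (by omega)]
        have h2 : (L + 1 - 1) / 2 = (L - 1) / 2 + 1 := by omega
        rw [h2, pow_succ]; ring

-- ===== VERDICT (by name: the statement is the Claim_ definition above) =====
theorem count_palindromes_formula_spec : Claim_equal_count_palindromes_formula := by
  intro N b _ hpre
  unfold Spec_count_palindromes_formula
  by_cases hN : N ≤ 0
  · simp [count_palindromes_formula, count_palindromes_formula_alt, if_pos hN]
  · have hb : 2 ≤ b := by
      cases hpre with
      | inl h => omega
      | inr h => exact h
    have hN0 : 0 < N := by omega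
    have hbe : (b.toNat : Int) = b := Int.toNat_of_nonneg (by omega)
    have hνe : (N.toNat : Int) = N := Int.toNat_of_nonneg (by omega)
    have hβ : 1 < b.toNat := by omega
    set L := (Nat.digits b.toNat N.toNat).length with hLdef
    have hL1 : 1 ≤ L := by
      have hne : Nat.digits b.toNat N.toNat ≠ [] := Nat.digits_ne_nil_iff_ne_zero.mpr (by omega)
      have := List.length_pos_of_ne_nil hne
      omega
    set half := (L + 1) / 2 with hhalfdef
    have hh1 : 1 ≤ half := by omega
    have hhL : half ≤ L := by omega
    -- N's digit-length bounds
    have hνlt : N.toNat < b.toNat ^ L := (Nat.digits_length_le_iff hβ _).mp (le_refl _)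
    have hνge : ¬ (N.toNat < b.toNat ^ (L - 1)) := by
      intro hc
      have := (Nat.digits_length_le_iff hβ N.toNat).mpr hc
      omega
    have eL : ((b.toNat ^ L : Nat) : Int) = b ^ L := by push_cast [hbe]; ring
    have eL1 : ((b.toNat ^ (L - 1) : Nat) : Int) = b ^ (L - 1) := by push_cast [hbe]; ring
    have hNlt : N < b ^ L := by omega
    have hNge : b ^ (L - 1) ≤ N := by omega
    -- the exponent of the lower half
    have hpowt : (0:Int) < b ^ (L - half) := by positivity
    set h0 := PySem.Int.floordiv N (b ^ (L - half)) with hh0def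
    have hdiv : h0 * b ^ (L - half) ≤ N ∧ N < (h0 + 1) * b ^ (L - half) :=
      (PySem.Int.floordiv_eq_iff_of_pos hpowt).mp hh0def.symm
    have hsplit1 : b ^ (half - 1) * b ^ (L - half) = b ^ (L - 1) := by
      rw [← pow_add]
      congr 1
      omega
    have hsplit2 : b ^ half * b ^ (L - half) = b ^ L := by
      rw [← pow_add]
      congr 1
      omega
    have hstart_le_h0 : b ^ (half - 1) ≤ h0 := by
      rw [hh0def, PySem.Int.le_floordiv_iff_mul_le hpowt, hsplit1]
      exact hNge
    have hh0_lt_end : h0 < b ^ half := by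
      rw [hh0def, PySem.Int.floordiv_lt_iff_lt_mul hpowt, hsplit2]
      exact hNlt
    -- the two comparison facts for the loop
    have Hle : ∀ h : Int, b ^ (half - 1) ≤ h → h < b ^ half → h < h0 →
        palindrome_from_half h (L : Int) b ≤ N := by
      intro h hsh hlt hlth0
      obtain ⟨s, hs, hs0, hsb⟩ := pal_decomp b hb L half hL1 hhalfdef h hsh hlt
      rw [hs]
      have hmul : (h + 1) * b ^ (L - half) ≤ h0 * b ^ (L - half) :=
        mul_le_mul_of_nonneg_right (by omega) (by positivity)
      have hring : (h + 1) * b ^ (L - half) = h * b ^ (L - half) + b ^ (L - half) := by ring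
      linarith [hdiv.1]
    have Hgt : ∀ h : Int, b ^ (half - 1) ≤ h → h < b ^ half → h0 < h →
        N < palindrome_from_half h (L : Int) b := by
      intro h hsh hlt hgth0
      obtain ⟨s, hs, hs0, hsb⟩ := pal_decomp b hb L half hL1 hhalfdef h hsh hlt
      rw [hs]
      have hmul : (h0 + 1) * b ^ (L - half) ≤ h * b ^ (L - half) :=
        mul_le_mul_of_nonneg_right (by omega) (by positivity)
      linarith [hdiv.2]
    -- normalize the index arithmetic appearing in both ports
    have hKA : ((to_base N b).length : Int) = (L : Int) := by
      rw [to_base_eq b hb N hN0]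
      simp [hLdef]
    have hflA : PySem.Int.floordiv ((L : Int) + 1) 2 = (half : Int) := by
      rw [show ((L : Int) + 1) = ((L + 1 : Nat) : Int) by push_cast; ring,
        show (2:Int) = ((2:Nat):Int) by norm_num, PySem.Int.floordiv_natCast]
    have hstart : b ^ (((half : Nat) : Int) - 1).toNat = b ^ (half - 1) := by
      congr 1
      omega
    have hend : b ^ ((half : Nat) : Int).toNat = b ^ half := by
      rw [Int.toNat_natCast]
    have hKB : kLoop b (N.toNat + 1) N 0 = (L : Int) := by
      rw [kLoop_eq b hb _ _ _ (by omega), hLdef]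
      ring
    have hmB : PySem.Int.floordiv ((L : Int) - 1) 2 = (((L - 1) / 2 : Nat) : Int) := by
      rw [show ((L : Int) - 1) = ((L - 1 : Nat) : Int) by omega,
        show (2:Int) = ((2:Nat):Int) by norm_num, PySem.Int.floordiv_natCast]
    have htB : (((L : Nat) : Int) - ((half : Nat) : Int)).toNat = L - half := by omega
    have hmodB : PySem.Int.mod ((L : Nat) : Int) 2 = ((L % 2 : Nat) : Int) := by
      exact_mod_cast PySem.Int.mod_natCast L 2
    -- evaluate port A
    have hA : count_palindromes_formula N b
        = ((PySem.List.pyRange 1 (L : Int) 1).foldl (fun acc k => acc + count_k_digit_palindromes k b) 0)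
          + ((h0 - b ^ (half - 1)) + (if palindrome_from_half h0 (L : Int) b ≤ N then 1 else 0)) := by
      rw [count_palindromes_formula]
      rw [if_neg hN]
      simp only [hKA, hflA, hstart, hend]
      rw [loopA_count N b (L : Int) (PySem.List.pyGetD (to_base N b) 0 0)
        (b ^ half) h0 (b ^ (half - 1)) hh0_lt_end Hle Hgt (b ^ (half - 1)) _ (le_refl _),
        if_pos hstart_le_h0]
    -- evaluate port B
    have hB : count_palindromes_formula_alt N b
        = (if L % 2 = 1 then 2 * (b ^ ((L - 1) / 2) - 1) else (b + 1) * b ^ ((L - 1) / 2) - 2)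
          + (h0 - b ^ (half - 1))
          + (if palindrome_from_half h0 (L : Int) b ≤ N then 1 else 0) := by
      rw [count_palindromes_formula_alt]
      rw [if_neg hN]
      simp only [hKB, hflA, hmB, htB, hstart, hmodB]
      rw [Int.toNat_natCast, ← hh0def]
      have hcast1 : ((((L % 2 : Nat)) : Int) = 1) ↔ L % 2 = 1 := by omega
      by_cases hpar : L % 2 = 1
      · simp only [if_pos (hcast1.mpr hpar), if_pos hpar]
        split_ifs <;> ring
      · simp only [if_neg (fun hc => hpar (hcast1.mp hc)), if_neg hpar]
        split_ifs <;> ring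
    rw [hA, hB, prefix_sum_eq b L hL1]
    split_ifs <;> ring
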